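-- pv_equiv track=rewrite | github.com/koyadovic/simple_tetris | main.py | get_right_coords_for_collision
-- ===== SOURCE A (Python) =====
-- def get_right_coords_for_collision(shape):
--     for y, cols in enumerate(shape):
--         y_found = False
--         for x in range(len(shape[y]) - 1, -1, -1):
--             cell = shape[y][x]
--             if y_found:
--                 continue
--             if cell == 1:
--                 y_found = True
--                 yield x, y
-- ===== SOURCE B (Python) =====
-- def get_right_coords_for_collision(shape):
--     for y, cols in enumerate(shape):
--         last = None
--         for x, cell in enumerate(cols):
--             if cell == 1:
--                 last = x
--         if last is not None:
--             yield last, y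
-- ===== Notes on version B (the rewrite author's own statement) =====
-- stated objective: simpler
-- what changed: Replaces A's right-to-left scan with a found-flag that keeps iterating after the hit by a plain left-to-right pass that keeps the last index holding 1 and yields it after the row.
import Mathlib
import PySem

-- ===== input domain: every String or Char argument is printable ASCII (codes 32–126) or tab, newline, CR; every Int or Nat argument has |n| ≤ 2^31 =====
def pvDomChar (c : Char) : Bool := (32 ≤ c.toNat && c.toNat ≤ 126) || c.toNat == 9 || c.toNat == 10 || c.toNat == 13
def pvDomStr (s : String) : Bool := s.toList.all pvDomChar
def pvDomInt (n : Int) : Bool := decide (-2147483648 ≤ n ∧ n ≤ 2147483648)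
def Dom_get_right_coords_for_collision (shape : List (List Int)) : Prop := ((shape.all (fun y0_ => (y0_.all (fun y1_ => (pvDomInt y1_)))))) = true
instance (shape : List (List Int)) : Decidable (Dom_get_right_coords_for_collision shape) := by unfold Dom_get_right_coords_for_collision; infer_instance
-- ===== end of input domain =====

-- B differs from A only in how each row is scanned (left-to-right running-last instead of
-- right-to-left with a found flag); the equivalence proved is about the listed yields.

-- ===== PORT A =====
-- inner loop 'for x in range(len(cols)-1, -1, -1)': the downward index loop is transcribed
-- as recursion on n, processing indices n-1, n-2, …, 0 in that order, carrying the found flag.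
def rowA (cols : List Int) (y : Int) : Nat → Bool → List (Int × Int)
  | 0, _ => []
  | n + 1, found =>
      -- cell = shape[y][x]; the index n is always in range, so pyGet? is some
      let cell := (PySem.List.pyGet? cols (n : Int)).getD 0
      if found then rowA cols y n found
      else if cell == 1 then ((n : Int), y) :: rowA cols y n true
      else rowA cols y n false

def get_right_coords_for_collision (shape : List (List Int)) : List (Int × Int) :=
  (shape.foldl (fun (st : Int × List (Int × Int)) cols =>
      (st.1 + 1, st.2 ++ rowA cols st.1 cols.length false)) (0, [])).2

-- ===== PORT B =====
def get_right_coords_for_collision_alt (shape : List (List Int)) : List (Int × Int) :=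
  (shape.foldl (fun (st : Int × List (Int × Int)) cols =>
      let last := (cols.foldl (fun (p : Int × Option Int) cell =>
          (p.1 + 1, if cell == 1 then some p.1 else p.2)) (0, none)).2
      (st.1 + 1, match last with
        | some x => st.2 ++ [(x, st.1)]
        | none => st.2)) (0, [])).2

-- ===== PRECONDITION & SPEC =====
def Spec_get_right_coords_for_collision (shape : List (List Int)) (out : List (Int × Int)) : Prop := out = get_right_coords_for_collision_alt shape
instance (shape : List (List Int)) (out : List (Int × Int)) : Decidable (Spec_get_right_coords_for_collision shape out) := by unfold Spec_get_right_coords_for_collision; infer_instance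

-- ===== CLAIM (what is proved, stated in full; the proofs are below) =====
def Claim_equal_get_right_coords_for_collision : Prop := ∀ (shape : List (List Int)), Dom_get_right_coords_for_collision shape → Spec_get_right_coords_for_collision shape (get_right_coords_for_collision shape)

-- ===== LEMMAS AND PROOFS =====

-- greatest index i < n with cols[i] = 1 (proof-only characterisation of one row's result)
def maxOne (cols : List Int) : Nat → Option Int
  | 0 => none
  | n + 1 => if (PySem.List.pyGet? cols (n : Int)).getD 0 == 1 then some (n : Int) else maxOne cols n

theorem rowA_true (cols : List Int) (y : Int) (n : Nat) : rowA cols y n true = [] := by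
  induction n with
  | zero => rfl
  | succ n ih => simp [rowA, ih]

theorem rowA_eq_maxOne (cols : List Int) (y : Int) (n : Nat) :
    rowA cols y n false = (maxOne cols n).elim [] (fun x => [(x, y)]) := by
  induction n with
  | zero => rfl
  | succ n ih =>
      simp only [rowA, maxOne, Bool.false_eq_true, if_false]
      by_cases hc : cols[n]?.getD 0 = 1
      · simp [hc, rowA_true]
      · simp [hc, ih]

-- B's left fold from state (k, o) is the last 1-index in cols offset by k, defaulting to o
theorem foldB_eq (cols : List Int) (k : Int) (o : Option Int) :
    (cols.foldl (fun (p : Int × Option Int) cell =>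
        (p.1 + 1, if cell == 1 then some p.1 else p.2)) (k, o)).2
    = (maxOne cols cols.length).elim o (fun x => some (x + k)) := by
  induction cols generalizing k o with
  | nil => rfl
  | cons c rest ih =>
      have hs : ∀ m : Nat, m < rest.length →
          maxOne (c :: rest) (m + 1 + 1) =
            (if (PySem.List.pyGet? rest (m : Int)).getD 0 == 1 then some ((m : Int) + 1)
             else maxOne (c :: rest) (m + 1)) := by
        intro m hm
        have : PySem.List.pyGet? (c :: rest) ((m : Nat) + 1 : Int) = PySem.List.pyGet? rest (m : Int) := by
          have h1 : ((m : Nat) + 1 : Int) = (((m + 1 : Nat)) : Int) := by push_cast; ring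
          rw [h1, PySem.List.pyGet?_natCast, PySem.List.pyGet?_natCast]
          simp
        simp only [maxOne]
        rw [show ((m + 1 : Nat) : Int) = (m : Int) + 1 by push_cast; ring] at *
        rw [this]
      -- relate maxOne on (c :: rest) to maxOne on rest, shifted by one
      have key : ∀ m : Nat, m ≤ rest.length →
          maxOne (c :: rest) (m + 1) =
            (maxOne rest m).elim (if c == 1 then some (0 : Int) else none) (fun x => some (x + 1)) := by
        intro m
        induction m with
        | zero =>
            intro _
            simp only [maxOne]
            rw [show (0 : Int) = ((0 : Nat) : Int) from rfl, PySem.List.pyGet?_natCast]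
            simp [Option.elim]
        | succ m ihm =>
            intro hm
            have hm' : m ≤ rest.length := Nat.le_of_succ_le hm
            have hmlt : m < rest.length := hm
            rw [hs m hmlt, ihm hm']
            simp only [maxOne]
            split <;> simp [Option.elim]
      simp only [List.foldl_cons, ih, List.length_cons]
      rw [key rest.length (le_refl _)]
      rcases h : maxOne rest rest.length with _ | x
      · simp [Option.elim]; split <;> simp
      · simp [Option.elim]; ring
  
-- per-row: A's inner loop equals B's inner fold
theorem row_eq (cols : List Int) (y : Int) :
    rowA cols y cols.length false
      = (match (cols.foldl (fun (p : Int × Option Int) cell =>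
            (p.1 + 1, if cell == 1 then some p.1 else p.2)) (0, none)).2 with
          | some x => [(x, y)]
          | none => ([] : List (Int × Int))) := by
  rw [rowA_eq_maxOne, foldB_eq]
  rcases maxOne cols cols.length with _ | x <;> simp [Option.elim]

-- outer folds agree for any starting state
theorem fold_eq (shape : List (List Int)) (y : Int) (acc : List (Int × Int)) :
    shape.foldl (fun (st : Int × List (Int × Int)) cols =>
        (st.1 + 1, st.2 ++ rowA cols st.1 cols.length false)) (y, acc)
    = shape.foldl (fun (st : Int × List (Int × Int)) cols =>
        let last := (cols.foldl (fun (p : Int × Option Int) cell =>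
            (p.1 + 1, if cell == 1 then some p.1 else p.2)) (0, none)).2
        (st.1 + 1, match last with
          | some x => st.2 ++ [(x, st.1)]
          | none => st.2)) (y, acc) := by
  induction shape generalizing y acc with
  | nil => rfl
  | cons cols rest ih =>
      simp only [List.foldl_cons]
      rw [row_eq cols y]
      rcases h : (cols.foldl (fun (p : Int × Option Int) cell =>
          (p.1 + 1, if cell == 1 then some p.1 else p.2)) (0, none)).2 with _ | x
      · simpa using ih (y + 1) acc
      · simpa using ih (y + 1) (acc ++ [(x, y)])

-- ===== VERDICT (by name: the statement is the Claim_ definition above) =====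
theorem get_right_coords_for_collision_spec : Claim_equal_get_right_coords_for_collision := by
  intro shape _
  unfold Spec_get_right_coords_for_collision get_right_coords_for_collision get_right_coords_for_collision_alt
  rw [fold_eq]
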